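-- pv_equiv track=rewrite | github.com/FadedBronze/cses-solutions | intro/digit_queries.py | digit_query
-- ===== SOURCE A (Python) =====
-- def digit_query(N):
--     base = 0
--     i = 1
--
--     while True:
--         new_base = pow(10, i) * i
--
--         for j in range(i-1, 0, -1):
--             new_base -= pow(10, j)
--
--         if new_base > N:
--             break;
--
--         base = new_base
--         i += 1
--
--     if base == 0:
--         base = 1
--
--     q = (N - base) // i + pow(10, i-1)
--     r = (N - base) % i
--
--     return q // pow(10, i - r - 1) % 10
-- ===== SOURCE B (Python) =====
-- def digit_query(N):
--     # Running-remainder digit query: subtract whole digit-blocks instead of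
--     # computing absolute block start positions like A does.
--     n = N
--     i = 1
--     while n > 9 * pow(10, i - 1) * i:
--         n -= 9 * pow(10, i - 1) * i
--         i += 1
--     number = (n - 1) // i + pow(10, i - 1)
--     r = (n - 1) % i
--     return number // pow(10, i - r - 1) % 10
-- ===== Notes on version B (the rewrite author's own statement) =====
-- stated objective: simpler
-- what changed: Replaces A's absolute block-start computation (inner for-loop summing powers of 10 each outer iteration, plus the base==0 fixup) by the textbook running-remainder form that subtracts each digit block's size from N, so no inner loop and no fixup remain.
import Mathlib
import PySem

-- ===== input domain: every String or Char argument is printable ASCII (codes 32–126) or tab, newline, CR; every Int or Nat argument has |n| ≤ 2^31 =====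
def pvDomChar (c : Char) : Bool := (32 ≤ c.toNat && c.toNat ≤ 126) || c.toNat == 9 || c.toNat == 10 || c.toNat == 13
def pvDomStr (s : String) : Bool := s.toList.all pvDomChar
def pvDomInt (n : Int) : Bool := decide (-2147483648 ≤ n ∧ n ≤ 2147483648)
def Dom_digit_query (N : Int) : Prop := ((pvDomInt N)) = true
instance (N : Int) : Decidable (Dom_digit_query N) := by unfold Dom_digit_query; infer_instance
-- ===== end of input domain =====

-- B replaces A's absolute block-start computation (inner power-summing loop and base==0 fixup)
-- by the textbook running-remainder digit query; objective: simpler.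

-- ===== PORT A =====
-- A's per-iteration new_base computation: new_base = 10^i * i; for j in range(i-1,0,-1): new_base -= 10^j
def pvNbA (i : Int) : Int :=
  (PySem.List.pyRange (i-1) 0 (-1)).foldl (fun nb j => nb - (10:Int) ^ j.toNat) ((10:Int) ^ i.toNat * i)

-- termination helpers for A's while-loop (cited by the port's decreasing_by)
lemma pvFoldl_sub_shift (l : List Int) : ∀ a c : Int,
    l.foldl (fun nb j => nb - (10:Int) ^ j.toNat) (a + c)
      = l.foldl (fun nb j => nb - (10:Int) ^ j.toNat) a + c := by
  induction l with
  | nil => intro a c; rfl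
  | cons x xs ih =>
      intro a c
      simp only [List.foldl_cons]
      have : a + c - (10:Int) ^ x.toNat = (a - (10:Int) ^ x.toNat) + c := by ring
      rw [this, ih]

lemma pvNbA_succ (i : Int) (h : 1 ≤ i) :
    pvNbA (i+1) = pvNbA i + 9 * (10:Int) ^ i.toNat * (i+1) := by
  unfold pvNbA
  have h1 : (i + 1 - 1 : Int) = i := by ring
  rw [h1, PySem.List.pyRange_neg_one_cons (by omega : (0:Int) < i)]
  simp only [List.foldl_cons]
  have ht : (i+1).toNat = i.toNat + 1 := by omega
  rw [ht, pow_succ]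
  have h2 : (10:Int) ^ i.toNat * 10 * (i + 1) - 10 ^ i.toNat
      = (10:Int) ^ i.toNat * i + (9 * (10:Int) ^ i.toNat * (i+1)) := by ring
  rw [h2, pvFoldl_sub_shift]

lemma pvNbA_lt (i : Int) (h : 1 ≤ i) : pvNbA i < pvNbA (i+1) := by
  rw [pvNbA_succ i h]
  have : (0:Int) < (10:Int) ^ i.toNat := by positivity
  nlinarith

-- A's while-True loop; h is a totality guard (i starts at 1 and only increments)
def pvLoopA (N base i : Int) (h : 1 ≤ i) : Int × Int :=
  if pvNbA i > N then (base, i)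
  else pvLoopA N (pvNbA i) (i+1) (by omega)
termination_by (N + 1 - pvNbA i).toNat
decreasing_by
  have := pvNbA_lt i h
  omega

lemma pv_one_le_one : (1:Int) ≤ 1 := le_refl 1

def digit_query (N : Int) : Int :=
  match pvLoopA N 0 1 pv_one_le_one with
  | (base, i) =>
    let base := if base = 0 then 1 else base
    let q := PySem.Int.floordiv (N - base) i + (10:Int) ^ (i-1).toNat
    let r := PySem.Int.mod (N - base) i
    PySem.Int.mod (PySem.Int.floordiv q ((10:Int) ^ (i - r - 1).toNat)) 10

-- ===== PORT B =====
-- B's while-loop; h is a totality guard (i starts at 1 and only increments)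
def pvLoopB (n i : Int) (h : 1 ≤ i) : Int × Int :=
  if n > 9 * (10:Int) ^ (i-1).toNat * i then
    pvLoopB (n - 9 * (10:Int) ^ (i-1).toNat * i) (i+1) (by omega)
  else (n, i)
termination_by n.toNat
decreasing_by
  have h1 : (0:Int) < (10:Int) ^ (i-1).toNat := by positivity
  have h2 : (0:Int) < 9 * (10:Int) ^ (i-1).toNat * i := by nlinarith
  omega

def digit_query_alt (N : Int) : Int :=
  match pvLoopB N 1 pv_one_le_one with
  | (n, i) =>
    let number := PySem.Int.floordiv (n - 1) i + (10:Int) ^ (i-1).toNat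
    let r := PySem.Int.mod (n - 1) i
    PySem.Int.mod (PySem.Int.floordiv number ((10:Int) ^ (i - r - 1).toNat)) 10

-- ===== PRECONDITION & SPEC =====
def Spec_digit_query (N : Int) (out : Int) : Prop := out = digit_query_alt N
instance (N : Int) (out : Int) : Decidable (Spec_digit_query N out) := by unfold Spec_digit_query; infer_instance

-- ===== CLAIM (what is proved, stated in full; the proofs are below) =====
def Claim_equal_digit_query : Prop := ∀ (N : Int), Dom_digit_query N → Spec_digit_query N (digit_query N)

-- ===== LEMMAS AND PROOFS =====

-- the effective base A uses after its `base == 0 → 1` fixup, as a function of the last block index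
def pvC (j : Int) : Int := if j = 0 then 1 else pvNbA j

lemma pvNbA_one : pvNbA 1 = 10 := by decide

lemma pvNbA_ge_ten (i : Int) (h : 1 ≤ i) : 10 ≤ pvNbA i := by
  induction i, h using Int.le_induction with
  | base => rw [pvNbA_one]
  | succ k hk ih =>
      have := pvNbA_lt k hk
      omega

lemma pvNbA_key (i : Int) (h : 1 ≤ i) :
    pvNbA i = pvC (i-1) + 9 * (10:Int) ^ (i-1).toNat * i := by
  rcases eq_or_lt_of_le h with h1 | h1
  · subst h1
    simp [pvC, pvNbA_one]
  · have h2 : (1:Int) ≤ i - 1 := by omega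
    have := pvNbA_succ (i-1) h2
    have h3 : (i - 1 + 1 : Int) = i := by ring
    rw [h3] at this
    rw [this]
    simp [pvC]
    omega

lemma pvLoop_agree (N : Int) : ∀ (d : Nat) (i : Int) (h : 1 ≤ i),
    (N + 1 - pvNbA i).toNat ≤ d →
    ∃ j, ∃ _hj : 1 ≤ j,
      pvLoopA N (if i = 1 then 0 else pvNbA (i-1)) i h
        = ((if j = 1 then 0 else pvNbA (j-1)), j) ∧
      pvLoopB (N + 1 - pvC (i-1)) i h = (N + 1 - pvC (j-1), j) := by
  intro d
  induction d with
  | zero =>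
      intro i h hd
      have hstop : pvNbA i > N := by omega
      refine ⟨i, h, ?_, ?_⟩
      · rw [pvLoopA, if_pos hstop]
      · have hk := pvNbA_key i h
        have hng : ¬ (N + 1 - pvC (i-1) > 9 * (10:Int) ^ (i-1).toNat * i) := by omega
        rw [pvLoopB, if_neg hng]
  | succ d ih =>
      intro i h hd
      by_cases hstop : pvNbA i > N
      · refine ⟨i, h, ?_, ?_⟩
        · rw [pvLoopA, if_pos hstop]
        · have hk := pvNbA_key i h
          have hng : ¬ (N + 1 - pvC (i-1) > 9 * (10:Int) ^ (i-1).toNat * i) := by omega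
          rw [pvLoopB, if_neg hng]
      · -- loop continues
        rw [not_lt] at hstop
        have hk := pvNbA_key i h
        have hlt := pvNbA_lt i h
        have hd' : (N + 1 - pvNbA (i+1)).toNat ≤ d := by omega
        obtain ⟨j, hj, hA, hB⟩ := ih (i+1) (by omega) hd'
        refine ⟨j, hj, ?_, ?_⟩
        · rw [pvLoopA, if_neg (not_lt.mpr hstop)]
          have h1 : (i + 1 - 1 : Int) = i := by ring
          rw [h1] at hA
          have h2 : (if i + 1 = 1 then (0:Int) else pvNbA i) = pvNbA i := by
            rw [if_neg (by omega)]
          rw [h2] at hA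
          exact hA
        · rw [pvLoopB]
          have hg : N + 1 - pvC (i-1) > 9 * (10:Int) ^ (i-1).toNat * i := by omega
          rw [if_pos hg]
          have h1 : (i + 1 - 1 : Int) = i := by ring
          rw [h1] at hB
          have h2 : pvC i = pvNbA i := by rw [pvC, if_neg (by omega)]
          rw [h2] at hB
          have h3 : N + 1 - pvC (i-1) - 9 * (10:Int) ^ (i-1).toNat * i = N + 1 - pvNbA i := by omega
          rw [h3]
          exact hB

-- ===== VERDICT (by name: the statement is the Claim_ definition above) =====
theorem digit_query_spec : Claim_equal_digit_query := by
  intro N _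
  unfold Spec_digit_query digit_query digit_query_alt
  obtain ⟨j, hj, hA, hB⟩ :=
    pvLoop_agree N (N + 1 - pvNbA 1).toNat 1 pv_one_le_one (le_refl _)
  rw [if_pos rfl] at hA
  have h1' : ((1:Int) - 1) = 0 := by ring
  have h1 : pvC 0 = 1 := by simp [pvC]
  rw [h1', h1] at hB
  have hBN : N + 1 - 1 = N := by ring
  rw [hBN] at hB
  rw [hA, hB]
  dsimp only
  have hfix : (if (if j = 1 then (0:Int) else pvNbA (j-1)) = 0 then 1 else (if j = 1 then (0:Int) else pvNbA (j-1))) = pvC (j-1) := by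
    by_cases hj1 : j = 1
    · simp [hj1, pvC]
    · have h10 := pvNbA_ge_ten (j-1) (by omega)
      rw [if_neg hj1, if_neg (by omega), pvC, if_neg (by omega)]
  simp only [hfix]
  have hn : N + 1 - pvC (j-1) - 1 = N - pvC (j-1) := by ring
  rw [hn]
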